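-- pv_equiv track=rewrite | github.com/kozaka93/2023Z-DataVisualizationTechniques | projects/project2/mokwa_pergala_rowicki/kody/skrypty_zliczajace/skrypt_java.py | stworz_licznik_ilosci_linii_odstepu
-- ===== SOURCE A (Python) =====
-- from collections import Counter
--
-- def stworz_licznik_ilosci_linii_odstepu(tekst_z_pliku):
--     licznik = Counter()
--     ilosc_odstepow_po_kolei = 0
--     for wyraz in tekst_z_pliku:
--         if wyraz == "\n":
--             ilosc_odstepow_po_kolei += 1
--             licznik["Liczba linijek odstepu"] += 1
--         else:
--             if ilosc_odstepow_po_kolei == 0: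
--                 licznik["Brak odstepu"] += 1
--             else:
--                 licznik[f"{ilosc_odstepow_po_kolei} linijki odstepu"] += 1
--                 ilosc_odstepow_po_kolei = 0
--     if ilosc_odstepow_po_kolei != 0:
--         licznik[f"{ilosc_odstepow_po_kolei} linijki odstepu"] += 1
--     return licznik
-- ===== SOURCE B (Python) =====
-- from collections import Counter
-- from itertools import groupby
--
-- def stworz_licznik_ilosci_linii_odstepu(tekst_z_pliku):
--     licznik = Counter()
--     first = True
--     for is_odstep, grupa in groupby(tekst_z_pliku, key=lambda wyraz: wyraz == "\n"):
--         n = sum(1 for _ in grupa)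
--         if is_odstep:
--             licznik["Liczba linijek odstepu"] += n
--             licznik[f"{n} linijki odstepu"] += 1
--         else:
--             m = n if first else n - 1
--             if m:
--                 licznik["Brak odstepu"] += m
--         first = False
--     return licznik
-- ===== Notes on version B (the rewrite author's own statement) =====
-- stated objective: alternative
-- what changed: B decomposes the input into maximal runs (itertools.groupby over the is-newline key) and adds each run's whole contribution to the Counter at once (n newline lines / one gap of size n per newline run, m or m-1 non-gap lines per other run), instead of A's element-by-element state machine with a running gap counter and an end-of-loop flush.
import Mathlib
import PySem

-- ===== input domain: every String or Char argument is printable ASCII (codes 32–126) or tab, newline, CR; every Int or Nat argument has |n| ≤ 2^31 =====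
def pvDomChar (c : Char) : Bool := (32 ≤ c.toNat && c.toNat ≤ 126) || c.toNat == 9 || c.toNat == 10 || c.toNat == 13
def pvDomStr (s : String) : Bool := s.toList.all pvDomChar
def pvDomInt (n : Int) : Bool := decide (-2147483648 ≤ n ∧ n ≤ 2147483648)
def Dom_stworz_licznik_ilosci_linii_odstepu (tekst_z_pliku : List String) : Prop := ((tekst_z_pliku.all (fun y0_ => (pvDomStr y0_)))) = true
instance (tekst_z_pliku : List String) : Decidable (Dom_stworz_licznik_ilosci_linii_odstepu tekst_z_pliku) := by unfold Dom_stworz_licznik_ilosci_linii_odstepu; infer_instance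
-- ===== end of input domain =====

-- B replaces A's element-by-element gap state machine by a run-length (groupby) pass; alternative decomposition, same cost.

-- Counter's  licznik[k] += v  : read d.get(k, 0), write back (overwrite in place, new keys append)
def pvCAdd (d : PySem.Dict String Int) (k : String) (v : Int) : PySem.Dict String Int :=
  d.insert k (d.getD k 0 + v)

-- ===== PORT A =====
def pvStepA (st : PySem.Dict String Int × Int) (wyraz : String) : PySem.Dict String Int × Int :=
  if wyraz = "\n" then
    (pvCAdd st.1 "Liczba linijek odstepu" 1, st.2 + 1)
  else
    if st.2 = 0 then
      (pvCAdd st.1 "Brak odstepu" 1, st.2)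
    else
      (pvCAdd st.1 (PySem.Int.toStr st.2 ++ " linijki odstepu") 1, 0)

def stworz_licznik_ilosci_linii_odstepu (tekst_z_pliku : List String) : List (String × Int) :=
  let st := tekst_z_pliku.foldl pvStepA ((PySem.Dict.empty : PySem.Dict String Int), 0)
  (if st.2 ≠ 0 then pvCAdd st.1 (PySem.Int.toStr st.2 ++ " linijki odstepu") 1 else st.1).items

-- ===== PORT B =====
-- itertools.groupby(tekst, key = wyraz == "\n"), each run reduced to (key, length)
def pvRuns (xs : List String) : List (Bool × Nat) :=
  match xs with
  | [] => []
  | w :: ws =>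
    let k := w == "\n"
    (k, (ws.takeWhile (fun x => (x == "\n") == k)).length + 1)
      :: pvRuns (ws.dropWhile (fun x => (x == "\n") == k))
termination_by xs.length
decreasing_by
  simp only [List.length_cons]
  have := List.length_dropWhile_le (fun x => (x == "\n") == (w == "\n")) ws
  omega

def pvStepB (st : PySem.Dict String Int × Bool) (r : Bool × Nat) : PySem.Dict String Int × Bool :=
  if r.1 then
    (pvCAdd (pvCAdd st.1 "Liczba linijek odstepu" (r.2 : Int))
        (PySem.Int.toStr (r.2 : Int) ++ " linijki odstepu") 1, false)
  else
    let m : Int := if st.2 then (r.2 : Int) else (r.2 : Int) - 1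
    (if m ≠ 0 then pvCAdd st.1 "Brak odstepu" m else st.1, false)

def stworz_licznik_ilosci_linii_odstepu_alt (tekst_z_pliku : List String) : List (String × Int) :=
  ((pvRuns tekst_z_pliku).foldl pvStepB ((PySem.Dict.empty : PySem.Dict String Int), true)).1.items

-- ===== PRECONDITION & SPEC =====
def Spec_stworz_licznik_ilosci_linii_odstepu (tekst_z_pliku : List String) (out : List (String × Int)) : Prop := out = stworz_licznik_ilosci_linii_odstepu_alt tekst_z_pliku
instance (tekst_z_pliku : List String) (out : List (String × Int)) : Decidable (Spec_stworz_licznik_ilosci_linii_odstepu tekst_z_pliku out) := by unfold Spec_stworz_licznik_ilosci_linii_odstepu; infer_instance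

-- ===== CLAIM (what is proved, stated in full; the proofs are below) =====
def Claim_equal_stworz_licznik_ilosci_linii_odstepu : Prop := ∀ (tekst_z_pliku : List String), Dom_stworz_licznik_ilosci_linii_odstepu tekst_z_pliku → Spec_stworz_licznik_ilosci_linii_odstepu tekst_z_pliku (stworz_licznik_ilosci_linii_odstepu tekst_z_pliku)

-- ===== LEMMAS AND PROOFS =====

theorem pvCAdd_pvCAdd (d : PySem.Dict String Int) (k : String) (a b : Int) :
    pvCAdd (pvCAdd d k a) k b = pvCAdd d k (a + b) := by
  simp [pvCAdd, PySem.Dict.getD_insert_self, PySem.Dict.insert_insert_self, add_assoc]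

-- A's loop over a run of newlines
theorem pvA_nl_run (rs : List String) : ∀ (d : PySem.Dict String Int) (a g : Int),
    (∀ w ∈ rs, w = "\n") →
    rs.foldl pvStepA (pvCAdd d "Liczba linijek odstepu" a, g)
      = (pvCAdd d "Liczba linijek odstepu" (a + rs.length), g + rs.length) := by
  induction rs with
  | nil => intro d a g _; simp
  | cons w t ih =>
    intro d a g h
    have hw : w = "\n" := h w (by simp)
    simp only [List.foldl_cons, pvStepA, hw, if_true]
    rw [pvCAdd_pvCAdd]
    rw [ih d (a + 1) (g + 1) (fun x hx => h x (by simp [hx]))]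
    have e1 : a + 1 + (t.length : Int) = a + (("\n" :: t).length : Int) := by simp only [List.length_cons]; push_cast; ring
    have e2 : g + 1 + (t.length : Int) = g + (("\n" :: t).length : Int) := by simp only [List.length_cons]; push_cast; ring
    rw [e1, e2]

-- A's loop over a run of non-newlines, gap already 0
theorem pvA_brak_run (rs : List String) : ∀ (d : PySem.Dict String Int) (a : Int),
    (∀ w ∈ rs, w ≠ "\n") →
    rs.foldl pvStepA (pvCAdd d "Brak odstepu" a, 0)
      = (pvCAdd d "Brak odstepu" (a + rs.length), 0) := by
  induction rs with
  | nil => intro d a _; simp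
  | cons w t ih =>
    intro d a h
    have hw : w ≠ "\n" := h w (by simp)
    simp only [List.foldl_cons, pvStepA, if_neg hw, if_true]
    rw [pvCAdd_pvCAdd]
    rw [ih d (a + 1) (fun x hx => h x (by simp [hx]))]
    have e1 : a + 1 + (t.length : Int) = a + ((w :: t).length : Int) := by simp only [List.length_cons]; push_cast; ring
    rw [e1]

def pvFinA (st : PySem.Dict String Int × Int) : PySem.Dict String Int :=
  if st.2 ≠ 0 then pvCAdd st.1 (PySem.Int.toStr st.2 ++ " linijki odstepu") 1 else st.1

-- head of a dropWhile fails the predicate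
theorem pvHeadDrop {p : String → Bool} {l : List String} {x : String}
    (h : (l.dropWhile p).head? = some x) : p x = false := by
  rw [← List.find?_not_eq_head?_dropWhile] at h
  simpa using List.find?_some h

-- the combined invariant, by strong induction on the length of the remaining input
theorem pvMain (n : Nat) : ∀ (xs : List String), xs.length ≤ n →
    ((∀ (d : PySem.Dict String Int) (first : Bool),
        (first = false → ∀ w, xs.head? = some w → w = "\n") →
        pvFinA (xs.foldl pvStepA (d, 0)) = ((pvRuns xs).foldl pvStepB (d, first)).1)
     ∧ (∀ (d : PySem.Dict String Int) (g : Nat), 1 ≤ g →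
        (∀ w, xs.head? = some w → w ≠ "\n") →
        pvFinA (xs.foldl pvStepA (d, (g : Int)))
          = ((pvRuns xs).foldl pvStepB
              (pvCAdd d (PySem.Int.toStr (g : Int) ++ " linijki odstepu") 1, false)).1)) := by
  induction n with
  | zero =>
    intro xs hx
    have hnil : xs = [] := List.eq_nil_of_length_eq_zero (Nat.le_zero.mp hx)
    subst hnil
    refine ⟨fun d first _ => by simp [pvRuns, pvFinA], fun d g hg _ => ?_⟩
    have hgz : ((g : Int)) ≠ 0 := by omega
    simp only [pvRuns, List.foldl_nil, pvFinA, if_pos hgz]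
  | succ n ih =>
    intro xs hx
    cases xs with
    | nil =>
      refine ⟨fun d first _ => by simp [pvRuns, pvFinA], fun d g hg _ => ?_⟩
      have hgz : ((g : Int)) ≠ 0 := by omega
      simp only [pvRuns, List.foldl_nil, pvFinA, if_pos hgz]
    | cons w ws =>
      have hlws : ws.length ≤ n := by simpa using hx
      constructor
      · -- part G : gap is 0, 'first' constrains a leading non-newline run
        intro d first hfirst
        by_cases hw : w = "\n"
        · -- leading newline run
          subst hw
          have hkey : ("\n" == "\n") = true := by decide
          set p : String → Bool := fun x => x == "\n" with hp
          have hsplit : ws = ws.takeWhile p ++ ws.dropWhile p :=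
            (List.takeWhile_append_dropWhile).symm
          set t := ws.takeWhile p with ht
          set r := ws.dropWhile p with hr
          have hmem : ∀ x ∈ t, x = "\n" := by
            intro x hxm
            have := List.mem_takeWhile_imp hxm
            simpa [hp] using this
          have hrhead : ∀ w', r.head? = some w' → w' ≠ "\n" := by
            intro w' hh
            have := pvHeadDrop (p := p) hh
            simpa [hp] using this
          have hrlen : r.length ≤ n :=
            le_trans (List.length_dropWhile_le p ws) hlws
          -- A side: run the leading newline run
          have hA : ("\n" :: ws).foldl pvStepA (d, 0)
              = r.foldl pvStepA
                  (pvCAdd d "Liczba linijek odstepu" ((t.length + 1 : Nat) : Int),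
                   ((t.length + 1 : Nat) : Int)) := by
            conv_lhs => rw [show ws = t ++ r from hsplit]
            rw [show ("\n" :: (t ++ r)) = ("\n" :: t) ++ r by simp, List.foldl_append]
            have h1 : ("\n" :: t).foldl pvStepA (d, 0)
                = (pvCAdd d "Liczba linijek odstepu" (1 + (t.length : Int)),
                   (0 : Int) + 1 + (t.length : Int)) := by
              simp only [List.foldl_cons, pvStepA, if_true]
              exact pvA_nl_run t d 1 (0 + 1) hmem
            rw [h1]
            have hc : (((t.length + 1 : Nat)) : Int) = 1 + (t.length : Int) := by push_cast; ring
            rw [hc]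
            norm_num
          -- B side: one groupby step
          have hB : pvRuns ("\n" :: ws) = (true, t.length + 1) :: pvRuns r := by
            rw [ht, hr, hp]
            rw [pvRuns]
            simp only [show ("\n" == "\n") = true from rfl, beq_true]
          rw [hA, hB]
          simp only [List.foldl_cons, pvStepB, if_true]
          exact (ih r hrlen).2
            (pvCAdd d "Liczba linijek odstepu" ((t.length + 1 : Nat) : Int))
            (t.length + 1) (by omega) hrhead
        · -- leading non-newline run; 'first' must be true
          have hfirstT : first = true := by
            cases first with
            | false => exact absurd (hfirst rfl w rfl) hw
            | true => rfl
          subst hfirstT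
          have hkey : (w == "\n") = false := by simpa using hw
          set p : String → Bool := fun x => !(x == "\n") with hp
          have hsplit : ws = ws.takeWhile p ++ ws.dropWhile p :=
            (List.takeWhile_append_dropWhile).symm
          set t := ws.takeWhile p with ht
          set r := ws.dropWhile p with hr
          have hmem : ∀ x ∈ t, x ≠ "\n" := by
            intro x hxm
            have := List.mem_takeWhile_imp hxm
            simpa [hp] using this
          have hrhead : ∀ w', r.head? = some w' → w' = "\n" := by
            intro w' hh
            have := pvHeadDrop (p := p) hh
            simpa [hp] using this
          have hrlen : r.length ≤ n :=
            le_trans (List.length_dropWhile_le p ws) hlws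
          have hA : (w :: ws).foldl pvStepA (d, 0)
              = r.foldl pvStepA
                  (pvCAdd d "Brak odstepu" ((t.length + 1 : Nat) : Int), 0) := by
            conv_lhs => rw [show ws = t ++ r from hsplit]
            rw [show (w :: (t ++ r)) = (w :: t) ++ r by simp, List.foldl_append]
            have h1 : (w :: t).foldl pvStepA (d, 0)
                = (pvCAdd d "Brak odstepu" (1 + (t.length : Int)), 0) := by
              simp only [List.foldl_cons, pvStepA, if_neg hw, if_true]
              exact pvA_brak_run t d 1 hmem
            rw [h1]
            have hc : (((t.length + 1 : Nat)) : Int) = 1 + (t.length : Int) := by push_cast; ring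
            rw [hc]
          have hB : pvRuns (w :: ws) = (false, t.length + 1) :: pvRuns r := by
            rw [ht, hr, hp]
            rw [pvRuns]
            simp only [hkey, beq_false]
          rw [hA, hB]
          simp only [List.foldl_cons, pvStepB, if_true]
          have hm : ¬ (((t.length + 1 : Nat) : Int) = 0) := by
            push_cast; omega
          simp only [Bool.false_eq_true, if_false, hm, ne_eq,
            not_false_eq_true, if_pos]
          exact (ih r hrlen).1 _ false (fun _ w' hh => hrhead w' hh)
      · -- part N : a newline run of size g just ended; head is not a newline
        intro d g hg hhead
        have hw : w ≠ "\n" := hhead w rfl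
        have hkey : (w == "\n") = false := by simpa using hw
        have hgz : ((g : Int)) ≠ 0 := by omega
        set p : String → Bool := fun x => !(x == "\n") with hp
        have hsplit : ws = ws.takeWhile p ++ ws.dropWhile p :=
          (List.takeWhile_append_dropWhile).symm
        set t := ws.takeWhile p with ht
        set r := ws.dropWhile p with hr
        have hmem : ∀ x ∈ t, x ≠ "\n" := by
          intro x hxm
          have := List.mem_takeWhile_imp hxm
          simpa [hp] using this
        have hrhead : ∀ w', r.head? = some w' → w' = "\n" := by
          intro w' hh
          have := pvHeadDrop (p := p) hh
          simpa [hp] using this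
        have hrlen : r.length ≤ n :=
          le_trans (List.length_dropWhile_le p ws) hlws
        set d1 := pvCAdd d (PySem.Int.toStr (g : Int) ++ " linijki odstepu") 1 with hd1
        have hB : pvRuns (w :: ws) = (false, t.length + 1) :: pvRuns r := by
          rw [ht, hr, hp]
          rw [pvRuns]
          simp only [hkey, beq_false]
        have hgz' : g ≠ 0 := by omega
        have hstep1 : pvStepA (d, (g : Int)) w = (d1, 0) := by
          simp [pvStepA, hw, hgz', hd1]
        -- A side after the first element: a Brak run over t, then r
        have hA : (w :: ws).foldl pvStepA (d, (g : Int))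
            = r.foldl pvStepA
                (if t.length = 0 then d1 else pvCAdd d1 "Brak odstepu" ((t.length : Nat) : Int), 0) := by
          conv_lhs => rw [show ws = t ++ r from hsplit]
          rw [show (w :: (t ++ r)) = (w :: t) ++ r by simp, List.foldl_append]
          congr 1
          rw [List.foldl_cons, hstep1]
          cases htc : t with
          | nil => simp
          | cons v tt =>
            have hv : v ≠ "\n" := hmem v (by rw [htc]; simp)
            have hmem' : ∀ x ∈ tt, x ≠ "\n" := fun x hxm => hmem x (by rw [htc]; simp [hxm])
            simp only [List.foldl_cons, pvStepA, if_neg hv, if_true]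
            rw [pvA_brak_run tt d1 1 hmem']
            simp only [List.length_cons, Nat.succ_ne_zero, if_false]
            congr 2
            push_cast; ring
        rw [hA, hB]
        simp only [List.foldl_cons, pvStepB]
        have hms : ((((t.length + 1 : Nat)) : Int) - 1) = ((t.length : Nat) : Int) := by
          push_cast; ring
        by_cases htz : t.length = 0
        · simp only [htz, Bool.false_eq_true, if_false]
          norm_num
          exact (ih r hrlen).1 d1 false (fun _ w' hh => hrhead w' hh)
        · simp only [Bool.false_eq_true, if_false]
          simp only [if_neg htz, hms]
          have hc2 : ¬ ((t.length : Int) = 0) := by omega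
          rw [if_pos hc2]
          exact (ih r hrlen).1 (pvCAdd d1 "Brak odstepu" ((t.length : Nat) : Int)) false
            (fun _ w' hh => hrhead w' hh)

theorem stworz_licznik_ilosci_linii_odstepu_spec : Claim_equal_stworz_licznik_ilosci_linii_odstepu := by
  intro xs _
  unfold Spec_stworz_licznik_ilosci_linii_odstepu
  unfold stworz_licznik_ilosci_linii_odstepu stworz_licznik_ilosci_linii_odstepu_alt
  have h := (pvMain xs.length xs le_rfl).1 PySem.Dict.empty true (by simp)
  simpa [pvFinA] using congrArg PySem.Dict.items h
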